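-- pv_equiv track=rewrite | github.com/younhwan97/algorithm-practice | python/COS/COS-2-8-리스트의숫자순서재배치.py | solution
-- ===== SOURCE A (Python) =====
-- def solution(arr):
--     left, right = 0, len(arr) - 1
--     idx = 0
--     answer = [0 for _ in range(len(arr))]
--     while left <= right:
--         if idx % 2 == 0:
--             answer[idx] = arr[left]
--             left += 1
--         else:
--             answer[idx] = arr[right]
--             right -= 1
--         idx += 1
--     return answer
-- ===== SOURCE B (Python) =====
-- def solution(arr):
--     k = (len(arr) + 1) // 2
--     front = arr[:k]
--     back = arr[k:][::-1]
--     result = []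
--     for x, y in zip(front, back):
--         result += [x, y]
--     if len(back) < len(front):
--         result.append(front[-1])
--     return result
-- ===== Notes on version B (the rewrite author's own statement) =====
-- stated objective: alternative
-- what changed: Replaces the two-pointer loop with an idx%2 conditional writing into a preallocated array by a split of the list into its front half and the reversed back half, interleaved with zip plus a middle leftover for odd length.
import Mathlib
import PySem

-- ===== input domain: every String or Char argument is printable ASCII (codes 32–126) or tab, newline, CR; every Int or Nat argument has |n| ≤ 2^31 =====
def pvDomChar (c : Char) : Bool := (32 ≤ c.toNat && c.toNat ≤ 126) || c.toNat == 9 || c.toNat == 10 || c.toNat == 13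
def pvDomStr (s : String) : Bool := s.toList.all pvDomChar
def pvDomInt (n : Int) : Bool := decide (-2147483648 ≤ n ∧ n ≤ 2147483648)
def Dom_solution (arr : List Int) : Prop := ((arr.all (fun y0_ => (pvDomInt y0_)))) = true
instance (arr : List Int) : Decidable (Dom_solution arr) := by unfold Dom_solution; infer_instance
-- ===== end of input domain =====

-- B rearranges by splitting the list into its front half and the reversed back half and zipping them,
-- instead of A's two-pointer loop writing into a preallocated array on an idx%2 conditional (alternative, same cost).

-- ===== PORT A =====
-- the while loop: state (answer, left, right, idx); arr[left]/arr[right] read via pyGet? (in range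
-- on every state the loop reaches, so the .getD 0 default is never taken), answer[idx] = v via List.set.
def solutionLoop (arr : List Int) (answer : List Int) (left right idx : Int) : List Int :=
  if left ≤ right then
    if idx % 2 == 0 then
      solutionLoop arr (answer.set idx.toNat ((PySem.List.pyGet? arr left).getD 0)) (left + 1) right (idx + 1)
    else
      solutionLoop arr (answer.set idx.toNat ((PySem.List.pyGet? arr right).getD 0)) left (right - 1) (idx + 1)
  else answer
termination_by (right + 1 - left).toNat
decreasing_by all_goals omega

def solution (arr : List Int) : List Int :=
  solutionLoop arr ((List.range arr.length).map (fun _ => (0 : Int))) 0 ((arr.length : Int) - 1) 0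

-- ===== PORT B =====
def solution_alt (arr : List Int) : List Int :=
  let k := (arr.length + 1) / 2
  let front := arr.take k
  let back := (arr.drop k).reverse
  let result := (front.zip back).foldl (fun acc p => acc ++ [p.1, p.2]) []
  if back.length < front.length then result ++ [(PySem.List.pyGet? front (-1)).getD 0]
  else result

-- ===== PRECONDITION & SPEC =====
def Spec_solution (arr : List Int) (out : List Int) : Prop := out = solution_alt arr
instance (arr : List Int) (out : List Int) : Decidable (Spec_solution arr out) := by unfold Spec_solution; infer_instance

-- ===== CLAIM (what is proved, stated in full; the proofs are below) =====
def Claim_equal_solution : Prop := ∀ (arr : List Int), Dom_solution arr → Spec_solution arr (solution arr)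

-- ===== LEMMAS AND PROOFS =====

-- common functional description: pick alternately from the front (b = true) and the back (b = false)
def picks : List Int → Bool → List Int
  | [], _ => []
  | x :: t, true => x :: picks t false
  | x :: t, false => (x :: t).getLast! :: picks ((x :: t).dropLast) true
termination_by xs _ => xs.length
decreasing_by all_goals simp

theorem picks_concat_false (ys : List Int) (y : Int) :
    picks (ys ++ [y]) false = y :: picks ys true := by
  cases ys with
  | nil => simp [picks]
  | cons a t =>
    have h1 : (a :: (t ++ [y])).getLast! = y := by
      rw [List.getLast!_eq_getLast?_getD, ← List.cons_append, List.getLast?_concat]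
      rfl
    have h2 : (a :: (t ++ [y])).dropLast = a :: t := by
      rw [← List.cons_append, List.dropLast_concat]
    conv_lhs => rw [show (a :: t) ++ [y] = a :: (t ++ [y]) from rfl, picks]
    rw [h1, h2]

theorem picks_concat_true (x y : Int) (ys : List Int) :
    picks (x :: (ys ++ [y])) true = x :: y :: picks ys true := by
  rw [picks, picks_concat_false]

theorem set_take_succ (l : List Int) (n : Nat) (v : Int) (h : n < l.length) :
    (l.set n v).take (n + 1) = l.take n ++ [v] := by
  induction l generalizing n with
  | nil => simp at h
  | cons a t ih =>
    cases n with
    | zero => simp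
    | succ m => simp_all

theorem loopA_eq (cnt : Nat) : ∀ (arr answer : List Int) (left right idx : Int),
    0 ≤ left → right < (arr.length : Int) → (right + 1 - left).toNat = cnt →
    0 ≤ idx → idx.toNat + cnt = answer.length →
    solutionLoop arr answer left right idx =
      answer.take idx.toNat ++ picks ((arr.drop left.toNat).take cnt) (idx % 2 == 0) := by
  induction cnt with
  | zero =>
    intro arr answer left right idx hl hr hcnt hi hlen
    rw [solutionLoop, if_neg (by omega)]
    rw [picks.eq_def]
    simp [List.take_of_length_le (by omega : answer.length ≤ idx.toNat)]
  | succ c ih =>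
    intro arr answer left right idx hl hr hcnt hi hlen
    have hle : left ≤ right := by omega
    have hlnat : left.toNat < arr.length := by omega
    have hrnat : right.toNat < arr.length := by omega
    have hidx : idx.toNat < answer.length := by omega
    have hidx1 : (idx + 1).toNat = idx.toNat + 1 := by omega
    rw [solutionLoop, if_pos hle]
    by_cases hp : idx % 2 = 0
    · -- even: take from the front
      rw [if_pos (by simp [hp])]
      have hget : (PySem.List.pyGet? arr left).getD 0 = arr[left.toNat] := by
        rw [PySem.List.pyGet?_of_nonneg arr hl, List.getElem?_eq_getElem hlnat]
        rfl
      rw [hget, ih arr _ (left + 1) right (idx + 1) (by omega) hr (by omega) (by omega)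
            (by simp [List.length_set]; omega)]
      rw [hidx1, set_take_succ answer idx.toNat arr[left.toNat] hidx]
      have hseg : (arr.drop left.toNat).take (c + 1) =
          arr[left.toNat] :: (arr.drop (left + 1).toNat).take c := by
        rw [show (left + 1).toNat = left.toNat + 1 by omega,
            ← List.getElem_cons_drop hlnat, List.take_succ_cons]
      rw [hseg, show ((idx % 2 == 0) = true) by simp [hp], picks,
          show (((idx + 1) % 2 == 0) = false) by simp; omega]
      simp
    · -- odd: take from the back
      rw [if_neg (by simp [hp])]
      have hr0 : (0 : Int) ≤ right := by omega
      have hget : (PySem.List.pyGet? arr right).getD 0 = arr[right.toNat] := by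
        rw [PySem.List.pyGet?_of_nonneg arr hr0, List.getElem?_eq_getElem hrnat]
        rfl
      rw [hget, ih arr _ left (right - 1) (idx + 1) hl (by omega) (by omega) (by omega)
            (by simp [List.length_set]; omega)]
      rw [hidx1, set_take_succ answer idx.toNat arr[right.toNat] hidx]
      have hc : c < (arr.drop left.toNat).length := by rw [List.length_drop]; omega
      have h1 : (arr.drop left.toNat)[c]'hc = arr[right.toNat]'hrnat := by
        rw [List.getElem_drop]
        congr 1
        omega
      have hseg : (arr.drop left.toNat).take (c + 1) =
          (arr.drop left.toNat).take c ++ [arr[right.toNat]] := by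
        rw [List.take_add_one, List.getElem?_eq_getElem hc]
        simp [h1]
      rw [hseg, show ((idx % 2 == 0) = false) by simp [hp], picks_concat_false,
          show (((idx + 1) % 2 == 0) = true) by simp; omega]
      simp

theorem solution_eq_picks (arr : List Int) : solution arr = picks arr true := by
  unfold solution
  rw [loopA_eq arr.length arr _ 0 ((arr.length : Int) - 1) 0 (by omega) (by omega)
        (by omega) (by omega) (by simp)]
  simp

theorem alt_nil : solution_alt [] = [] := by decide

theorem alt_single (x : Int) : solution_alt [x] = [x] := by
  simp [solution_alt, PySem.List.pyGet?_neg_one]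

theorem alt_concat (x y : Int) (ys : List Int) :
    solution_alt (x :: (ys ++ [y])) = x :: y :: solution_alt ys := by
  have hkn : (ys.length + 1) / 2 ≤ ys.length := by omega
  have hk : (((x :: (ys ++ [y])).length) + 1) / 2 = (ys.length + 1) / 2 + 1 := by
    simp; omega
  simp only [solution_alt]
  rw [hk]
  rw [List.take_succ_cons, List.take_append_of_le_length hkn,
      List.drop_succ_cons, List.drop_append_of_le_length hkn]
  simp only [List.reverse_append, List.reverse_singleton, List.singleton_append,
    List.zip_cons_cons, PySem.List.foldl_append_eq_flatMap (fun p : Int × Int => [p.1, p.2]),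
    List.flatMap_cons, List.nil_append, List.length_cons, List.length_reverse,
    List.length_drop, List.length_take]
  have hlast : 1 ≤ (ys.length + 1) / 2 →
      PySem.List.pyGet? (x :: ys.take ((ys.length + 1) / 2)) (-1) =
        PySem.List.pyGet? (ys.take ((ys.length + 1) / 2)) (-1) := by
    intro hk1
    rw [PySem.List.pyGet?_neg_one, PySem.List.pyGet?_neg_one]
    have hne : ys.take ((ys.length + 1) / 2) ≠ [] := by
      intro h
      rw [List.take_eq_nil_iff] at h
      rcases h with h | h
      · omega
      · subst h; simp at hk1
    cases h : ys.take ((ys.length + 1) / 2) with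
    | nil => exact absurd h hne
    | cons a t => rw [List.getLast?_cons_cons]
  split
  next hL =>
    rw [hlast (by simp at hL; omega)]
    split
    next hR => simp
    next hR =>
      exfalso; simp at hL hR
      rcases hL with ⟨h1, h2, h3⟩
      have h0 := hR h1 h2
      subst h0; simp at h2
  next hL =>
    split
    next hR =>
      exfalso; simp at hL hR
      rcases hR with ⟨h1, h2, h3⟩
      have h0 := hL h1 h2
      subst h0; simp at h2
    next hR => simp

theorem alt_eq_picks (arr : List Int) : solution_alt arr = picks arr true := by
  suffices H : ∀ (n : Nat) (l : List Int), l.length ≤ n → solution_alt l = picks l true from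
    H arr.length arr le_rfl
  intro n
  induction n with
  | zero =>
    intro l hl
    have : l = [] := by cases l with | nil => rfl | cons a t => simp at hl
    subst this
    rw [alt_nil, picks]
  | succ n ih =>
    intro l hl
    cases l with
    | nil => rw [alt_nil, picks]
    | cons x xs =>
      rcases List.eq_nil_or_concat xs with rfl | ⟨ys, y, rfl⟩
      · rw [alt_single, picks, picks]
      · rw [List.concat_eq_append, alt_concat, picks_concat_true,
            ih ys (by simp at hl; omega)]

-- ===== VERDICT (by name: the statement is the Claim_ definition above) =====
theorem solution_spec : Claim_equal_solution := by
  intro arr _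
  unfold Spec_solution
  rw [solution_eq_picks, alt_eq_picks]
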